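-- pv_equiv track=rewrite | github.com/frankligy/NeoAntigenWorkflow | result/breast_cancer_analysis.py | extracting
-- ===== SOURCE A (Python) =====
-- def extracting(pam50_dic_reverse,hl_b,subtype):
--     # 'Basal-like' 'HER2-enriched' 'Luminal A' 'Luminal B'
--     patients = pam50_dic_reverse[subtype]
--     high_count,low_count = 0,0
--     for i in patients:
--         try:
--             label = hl_b[i]
--         except:
--             continue
--         if label == 'high':
--             high_count += 1
--         elif label == 'low':
--             low_count += 1
--     return high_count,low_count
-- ===== SOURCE B (Python) =====
-- def extracting(pam50_dic_reverse, hl_b, subtype):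
--     # Invert the traversal: tally patient multiplicities once, then walk the
--     # label mapping and add each patient's multiplicity to its label's total.
--     cnt = {}
--     for p in pam50_dic_reverse[subtype]:
--         cnt[p] = cnt.get(p, 0) + 1
--     high, low = 0, 0
--     for patient, label in hl_b.items():
--         if label == 'high':
--             high += cnt.get(patient, 0)
--         elif label == 'low':
--             low += cnt.get(patient, 0)
--     return high, low
-- ===== Notes on version B (the rewrite author's own statement) =====
-- stated objective: alternative
-- what changed: Inverts the traversal: instead of looping over the subtype's patients and looking each up in hl_b with try/except, B builds a multiplicity counter of the patients once and then iterates over hl_b.items(), adding each patient's multiplicity to the tally of its label.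
import Mathlib
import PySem

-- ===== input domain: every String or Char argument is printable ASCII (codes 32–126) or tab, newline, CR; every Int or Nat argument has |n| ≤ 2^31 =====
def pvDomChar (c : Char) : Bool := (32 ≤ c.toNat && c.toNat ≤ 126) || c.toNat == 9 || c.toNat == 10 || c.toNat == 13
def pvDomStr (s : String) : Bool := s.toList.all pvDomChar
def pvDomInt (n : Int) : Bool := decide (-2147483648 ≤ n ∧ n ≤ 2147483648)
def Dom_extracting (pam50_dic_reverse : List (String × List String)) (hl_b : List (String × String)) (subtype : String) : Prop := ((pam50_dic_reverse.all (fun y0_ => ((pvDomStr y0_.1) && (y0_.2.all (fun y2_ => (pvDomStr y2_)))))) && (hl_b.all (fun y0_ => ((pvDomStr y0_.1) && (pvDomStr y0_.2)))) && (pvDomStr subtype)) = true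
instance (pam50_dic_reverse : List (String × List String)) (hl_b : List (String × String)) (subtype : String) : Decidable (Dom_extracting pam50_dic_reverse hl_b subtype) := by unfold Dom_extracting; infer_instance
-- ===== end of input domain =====

-- B inverts the traversal: it tallies patient multiplicities once, then walks hl_b's items adding multiplicities per label (alternative decomposition; same cost).

-- ===== PORT A =====
-- A: dict lookup of subtype (KeyError excluded by Pre_), then one loop over patients counting
-- 'high'/'low', skipping patients missing from hl_b (the bare except).
def extracting (pam50_dic_reverse : List (String × List String)) (hl_b : List (String × String)) (subtype : String) : Int × Int :=
  match (PySem.Dict.ofList pam50_dic_reverse).get? subtype with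
  | none => (0, 0)   -- Python raises KeyError here; excluded by Pre_extracting
  | some patients =>
    patients.foldl (fun (acc : Int × Int) i =>
      match (PySem.Dict.ofList hl_b).get? i with
      | none => acc                      -- except: continue
      | some label =>
        if label == "high" then (acc.1 + 1, acc.2)
        else if label == "low" then (acc.1, acc.2 + 1)
        else acc) (0, 0)

-- ===== PORT B =====
-- B: build cnt[p] = multiplicity of p among the subtype's patients, then loop over hl_b.items()
-- adding cnt.get(patient, 0) to the tally of the item's label.
def extracting_alt (pam50_dic_reverse : List (String × List String)) (hl_b : List (String × String)) (subtype : String) : Int × Int :=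
  let patients := ((PySem.Dict.ofList pam50_dic_reverse).get? subtype).getD []  -- KeyError outside Pre_
  let cnt := patients.foldl (fun (d : PySem.Dict String Int) p => d.insert p (d.getD p 0 + 1)) PySem.Dict.empty
  (PySem.Dict.ofList hl_b).items.foldl (fun (acc : Int × Int) pl =>
    if pl.2 == "high" then (acc.1 + cnt.getD pl.1 0, acc.2)
    else if pl.2 == "low" then (acc.1, acc.2 + cnt.getD pl.1 0)
    else acc) (0, 0)

-- ===== PRECONDITION & SPEC =====
-- Pre_ excludes exactly the inputs where Python A (and B) raise KeyError: subtype absent from pam50_dic_reverse.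
def Pre_extracting (pam50_dic_reverse : List (String × List String)) (hl_b : List (String × String)) (subtype : String) : Prop :=
  subtype ∈ pam50_dic_reverse.map Prod.fst
instance (pam50_dic_reverse : List (String × List String)) (hl_b : List (String × String)) (subtype : String) : Decidable (Pre_extracting pam50_dic_reverse hl_b subtype) := by unfold Pre_extracting; infer_instance

def pvWitness_extracting : (List (String × List String)) × (List (String × String)) × String :=
  ([("Luminal A", ["p1", "p2", "p3"])], [("p1", "high"), ("p2", "low")], "Luminal A")

def Spec_extracting (pam50_dic_reverse : List (String × List String)) (hl_b : List (String × String)) (subtype : String) (out : Int × Int) : Prop := out = extracting_alt pam50_dic_reverse hl_b subtype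
instance (pam50_dic_reverse : List (String × List String)) (hl_b : List (String × String)) (subtype : String) (out : Int × Int) : Decidable (Spec_extracting pam50_dic_reverse hl_b subtype out) := by unfold Spec_extracting; infer_instance

-- ===== CLAIM (what is proved, stated in full; the proofs are below) =====
def Claim_equal_extracting : Prop := ∀ (pam50_dic_reverse : List (String × List String)) (hl_b : List (String × String)) (subtype : String), Dom_extracting pam50_dic_reverse hl_b subtype → Pre_extracting pam50_dic_reverse hl_b subtype → Spec_extracting pam50_dic_reverse hl_b subtype (extracting pam50_dic_reverse hl_b subtype)

-- ===== LEMMAS AND PROOFS =====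

-- A's counting loop: closed form as counts over the looked-up labels, ∀ accumulator.
theorem extracting_loopA_eq (d : PySem.Dict String String) (l : List String) (a b : Int) :
    l.foldl (fun (acc : Int × Int) i =>
      match d.get? i with
      | none => acc
      | some label =>
        if label == "high" then (acc.1 + 1, acc.2)
        else if label == "low" then (acc.1, acc.2 + 1)
        else acc) (a, b)
    = (a + ((l.filterMap (fun i => d.get? i)).count "high" : Int),
       b + ((l.filterMap (fun i => d.get? i)).count "low" : Int)) := by
  induction l generalizing a b with
  | nil => simp
  | cons i l ih =>
    simp only [List.foldl_cons, List.filterMap_cons]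
    cases h : d.get? i with
    | none => exact ih a b
    | some label =>
      by_cases h1 : label == "high"
      · have : label = "high" := by simpa using h1
        subst this
        simp only [if_true, beq_self_eq_true, ih]
        simp
        omega
      · by_cases h2 : label == "low"
        · have : label = "low" := by simpa using h2
          subst this
          simp only [h1, if_true, beq_self_eq_true, ih]
          simp
          omega
        · simp only [h1, h2, ih]
          simp [List.count_cons, h1, h2]

-- B's items loop: closed form as two sums of weights over the item list, ∀ accumulator and weight function.
theorem extracting_loopB_eq (cnt : PySem.Dict String Int) (L : List (String × String)) (a b : Int) :
    L.foldl (fun (acc : Int × Int) pl =>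
      if pl.2 == "high" then (acc.1 + cnt.getD pl.1 0, acc.2)
      else if pl.2 == "low" then (acc.1, acc.2 + cnt.getD pl.1 0)
      else acc) (a, b)
    = (a + (L.map (fun pl => if pl.2 == "high" then cnt.getD pl.1 0 else 0)).sum,
       b + (L.map (fun pl => if pl.2 == "low" then cnt.getD pl.1 0 else 0)).sum) := by
  induction L generalizing a b with
  | nil => simp
  | cons pl L ih =>
    simp only [List.foldl_cons, List.map_cons, List.sum_cons]
    by_cases h1 : pl.2 = "high"
    · have hh : (pl.2 == "high") = true := by simp [h1]
      have hl : (pl.2 == "low") = false := by simp [h1]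
      rw [hh, hl]
      simp only [if_true, Bool.false_eq_true, if_false, ih]
      simp only [Prod.mk.injEq]
      constructor <;> ring
    · by_cases h2 : pl.2 = "low"
      · have hh : (pl.2 == "high") = false := by simp [h2]
        have hl : (pl.2 == "low") = true := by simp [h2]
        rw [hh, hl]
        simp only [if_true, Bool.false_eq_true, if_false, ih]
        simp only [Prod.mk.injEq]
        constructor <;> ring
      · have hh : (pl.2 == "high") = false := by simp [h1]
        have hl : (pl.2 == "low") = false := by simp [h2]
        rw [hh, hl]
        simp only [Bool.false_eq_true, if_false, ih]
        simp

-- The key set of an association-list dict is the deduped first-component list.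
theorem keys_ofList_eq (p : List (String × List String)) :
    (PySem.Dict.ofList p).keys = PySem.Set.ofList (p.map Prod.fst) := by
  rw [show PySem.Dict.ofList p = p.foldl (fun d x => d.insert x.1 x.2) PySem.Dict.empty from rfl,
      PySem.Dict.keys_foldl_insert_key]
  rfl

-- If key i never occurs in L, the indicator sum over L is 0.
theorem sum_indicator_not_mem (L : List (String × String)) (i tag : String)
    (h : i ∉ L.map Prod.fst) :
    (L.map (fun pl => if pl.1 == i && pl.2 == tag then (1 : Int) else 0)).sum = 0 := by
  induction L with
  | nil => simp
  | cons pl L ih =>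
    simp only [List.map_cons, List.mem_cons, not_or] at h
    have hb : (pl.1 == i) = false := beq_eq_false_iff_ne.mpr (fun e => h.1 e.symm)
    simp only [List.map_cons, List.sum_cons, hb, Bool.false_and, Bool.false_eq_true,
      if_false, zero_add]
    exact ih h.2

-- With nodup keys, the indicator sum over L is the membership indicator of (i, tag).
theorem sum_indicator_eq (L : List (String × String)) (i tag : String)
    (hnd : (L.map Prod.fst).Nodup) :
    (L.map (fun pl => if pl.1 == i && pl.2 == tag then (1 : Int) else 0)).sum
    = if (i, tag) ∈ L then 1 else 0 := by
  induction L with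
  | nil => simp
  | cons pl L ih =>
    simp only [List.map_cons, List.nodup_cons] at hnd
    simp only [List.map_cons, List.sum_cons, List.mem_cons]
    by_cases hk : pl.1 = i
    · have h0 := sum_indicator_not_mem L i tag (hk ▸ hnd.1)
      rw [h0]
      have hnm : (i, tag) ∉ L := fun hm => (hk ▸ hnd.1) (List.mem_map_of_mem hm)
      by_cases hv : pl.2 = tag
      · have hpair : (i, tag) = pl := by cases pl; simp_all
        have hb : (pl.1 == i && pl.2 == tag) = true := by
          rw [beq_iff_eq.mpr hk, beq_iff_eq.mpr hv]; rfl
        rw [hb]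
        simp [hpair]
      · have hpair : ((i, tag) : String × String) ≠ pl := by
          intro e; exact hv (by rw [← e])
        have hb : (pl.1 == i && pl.2 == tag) = false := by
          rw [beq_eq_false_iff_ne.mpr hv, Bool.and_false]
        rw [hb]
        simp [hpair, hnm]
    · have hpair : ((i, tag) : String × String) ≠ pl := by
        intro e; exact hk (by rw [← e])
      have hb : (pl.1 == i) = false := beq_eq_false_iff_ne.mpr hk
      rw [hb]
      simp only [Bool.false_and, Bool.false_eq_true, if_false, zero_add, ih hnd.2]
      simp [hpair]

-- The weighted sum over a dict's items equals the count of tag among the looked-up labels.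
theorem sum_items_count (hd : PySem.Dict String String) (hnd : hd.keys.Nodup)
    (tag : String) (ps : List String) :
    (hd.items.map (fun pl => if pl.2 == tag then (ps.count pl.1 : Int) else 0)).sum
    = ((ps.filterMap (fun i => hd.get? i)).count tag : Int) := by
  induction ps with
  | nil => simp [ite_self]
  | cons i ps ih =>
    have hsplit :
        (hd.items.map (fun pl => if pl.2 == tag then (((i :: ps).count pl.1 : Nat) : Int) else 0)).sum
        = (hd.items.map (fun pl => if pl.2 == tag then (ps.count pl.1 : Int) else 0)).sum
          + (hd.items.map (fun pl => if pl.1 == i && pl.2 == tag then (1 : Int) else 0)).sum := by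
      rw [← PySem.List.sum_map_add_int]
      apply congrArg
      apply List.map_congr_left
      intro pl _
      cases hveq : (pl.2 == tag) with
      | false => simp [hveq]
      | true =>
        cases hkeq : (pl.1 == i) with
        | false =>
          have hne : ¬ i = pl.1 := fun e => (beq_eq_false_iff_ne.mp hkeq) e.symm
          simp [hne]
        | true =>
          have e : pl.1 = i := by simpa using hkeq
          simp [e]
    rw [hsplit, ih, sum_indicator_eq hd.items i tag hnd]
    simp only [List.filterMap_cons]
    cases hg : hd.get? i with
    | none =>
      have hnm : (i, tag) ∉ hd.items := by
        intro hm
        have := PySem.Dict.get?_of_mem_items hd hm hnd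
        simp [hg] at this
      simp [hnm]
    | some v =>
      have hmemiff : (i, tag) ∈ hd.items ↔ v = tag := by
        constructor
        · intro hm
          have := PySem.Dict.get?_of_mem_items hd hm hnd
          simp [hg] at this
          exact this
        · intro hv
          subst hv
          exact PySem.Dict.mem_items_of_get?_eq_some hd hg
      by_cases hv : v = tag
      · subst hv
        simp [hmemiff]
      · have hne : ¬ tag = v := fun e => hv e.symm
        simp [hmemiff, hv]

-- ===== VERDICT (by name: the statement is the Claim_ definition above) =====
theorem extracting_spec : Claim_equal_extracting := by
  intro p h s _ hpre
  unfold Spec_extracting extracting extracting_alt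
  cases hget : (PySem.Dict.ofList p).get? s with
  | none =>
    exfalso
    unfold Pre_extracting at hpre
    have hnm := (PySem.Dict.get?_eq_none_iff_not_mem_keys _ _).mp hget
    rw [keys_ofList_eq] at hnm
    exact hnm ((PySem.Set.mem_ofList _ _).mpr hpre)
  | some patients =>
    simp only [Option.getD_some]
    rw [extracting_loopA_eq]
    have hcnt : patients.foldl (fun (d : PySem.Dict String Int) p => d.insert p (d.getD p 0 + 1)) PySem.Dict.empty
        = PySem.Dict.counter patients := PySem.Dict.foldl_insert_getD_add_one_eq_counter patients
    rw [hcnt, extracting_loopB_eq]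
    have hc : ∀ k, (PySem.Dict.counter patients).getD k 0 = (patients.count k : Int) :=
      fun k => PySem.Dict.getD_counter patients k
    simp only [hc]
    have hnd : (PySem.Dict.ofList h).keys.Nodup := PySem.Dict.nodup_keys_ofList h
    rw [sum_items_count (PySem.Dict.ofList h) hnd "high" patients,
        sum_items_count (PySem.Dict.ofList h) hnd "low" patients]
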